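-- pv_equiv track=rewrite | github.com/Sajidxyz/yt_uploader_auto | text_to_audio_generater.py | parse_youtube_json3
-- ===== SOURCE A (Python) =====
-- def parse_youtube_json3(data):
--     """Parse YouTube JSON3 subtitle format."""
--     transcript_parts = []
--
--     for event in data.get('events', []):
--         if 'segs' in event:
--             for seg in event['segs']:
--                 text = seg.get('utf8', '').strip()
--                 # Skip newlines and empty segments
--                 if text and text != '\n':
--                     transcript_parts.append(text)
--
--     # Join all parts and clean up
--     full_text = ' '.join(transcript_parts)
--     # Remove extra spaces
--     full_text = ' '.join(full_text.split())
--
--     return full_text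
-- ===== SOURCE B (Python) =====
-- def parse_youtube_json3(data):
--     """Parse YouTube JSON3 subtitle format."""
--     chunks = []
--     for event in data.get('events', []):
--         if 'segs' in event:
--             for seg in event['segs']:
--                 chunks.append(seg.get('utf8', ''))
--     blob = ' '.join(chunks)
--     # whitespace-normalize in one character pass (no strip/split):
--     out = []
--     started = False   # at least one word character emitted so far
--     pending = False   # a separator space is owed before the next word character
--     for ch in blob:
--         if ch.isspace():
--             pending = started
--         else:
--             if pending:
--                 out.append(' ')
--                 pending = False
--             out.append(ch)
--             started = True
--     return ''.join(out)
-- ===== Notes on version B (the rewrite author's own statement) =====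
-- stated objective: alternative
-- what changed: A collects stripped non-empty segment texts into a list and normalizes whitespace by a join-split-join word pipeline; B instead joins the raw segment texts into one string and whitespace-normalizes it with a single character-level state machine (started/pending flags emitting separator spaces), using no strip/split at all.
import Mathlib
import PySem

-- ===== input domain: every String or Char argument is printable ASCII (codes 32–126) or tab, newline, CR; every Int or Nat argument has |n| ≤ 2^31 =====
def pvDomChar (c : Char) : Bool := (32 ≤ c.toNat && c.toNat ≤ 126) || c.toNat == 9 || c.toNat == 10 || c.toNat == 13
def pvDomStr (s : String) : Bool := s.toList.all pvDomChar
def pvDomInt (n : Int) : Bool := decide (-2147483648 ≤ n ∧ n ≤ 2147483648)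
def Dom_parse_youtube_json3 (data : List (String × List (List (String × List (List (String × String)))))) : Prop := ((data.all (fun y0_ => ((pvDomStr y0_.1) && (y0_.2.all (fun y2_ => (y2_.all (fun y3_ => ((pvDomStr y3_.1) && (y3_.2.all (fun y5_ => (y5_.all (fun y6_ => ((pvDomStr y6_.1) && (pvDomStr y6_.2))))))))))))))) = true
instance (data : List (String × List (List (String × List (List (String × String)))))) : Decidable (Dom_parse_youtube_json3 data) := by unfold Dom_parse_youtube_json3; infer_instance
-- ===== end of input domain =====

-- B joins the raw segment texts and whitespace-normalizes the result with one
-- character-level state machine instead of A's strip/collect + join-split-join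
-- word pipeline (objective: alternative, same cost).

-- ===== PORT A =====
def parse_youtube_json3 (data : List (String × List (List (String × List (List (String × String)))))) : String :=
  let transcript_parts : List String :=
    ((PySem.Dict.mk data).getD "events" []).foldl (fun transcript_parts event =>
      if (PySem.Dict.mk event).contains "segs" then
        ((PySem.Dict.mk event).getD "segs" []).foldl (fun transcript_parts seg =>
          let text := PySem.Str.strip ((PySem.Dict.mk seg).getD "utf8" "")
          -- Python: `if text and text != '\n': transcript_parts.append(text)`
          if (text != "" && text != "\n") = true then transcript_parts ++ [text]
          else transcript_parts) transcript_parts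
      else transcript_parts) []
  let full_text := PySem.Str.join " " transcript_parts
  PySem.Str.join " " (PySem.Str.split₀ full_text)

-- ===== PORT B =====
def parse_youtube_json3_alt (data : List (String × List (List (String × List (List (String × String)))))) : String :=
  let chunks : List String :=
    ((PySem.Dict.mk data).getD "events" []).foldl (fun chunks event =>
      if (PySem.Dict.mk event).contains "segs" then
        ((PySem.Dict.mk event).getD "segs" []).foldl (fun chunks seg =>
          chunks ++ [(PySem.Dict.mk seg).getD "utf8" ""]) chunks
      else chunks) []
  let blob := PySem.Str.join " " chunks
  -- state = (out, started, pending); Python's `for ch in blob:` loop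
  let fin := blob.toList.foldl (fun (st : List Char × Bool × Bool) ch =>
      if PySem.Chars.isspace ch then (st.1, st.2.1, st.2.1)
      else ((if st.2.2 then st.1 ++ [' '] else st.1) ++ [ch], true, false))
    ([], false, false)
  String.ofList fin.1

-- ===== PRECONDITION & SPEC =====
-- Pre_ excludes only association lists with duplicate keys (in data, in an event, or in a
-- seg): those do not represent any Python dict, so no call of A can ever receive them.
def Pre_parse_youtube_json3 (data : List (String × List (List (String × List (List (String × String)))))) : Prop :=
  (data.map Prod.fst).Nodup ∧
  ∀ event ∈ (PySem.Dict.mk data).getD "events" [],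
    (event.map Prod.fst).Nodup ∧
    ∀ seg ∈ (PySem.Dict.mk event).getD "segs" [],
      (seg.map Prod.fst).Nodup
instance (data : List (String × List (List (String × List (List (String × String)))))) : Decidable (Pre_parse_youtube_json3 data) := by unfold Pre_parse_youtube_json3; infer_instance
def pvWitness_parse_youtube_json3 : (List (String × List (List (String × List (List (String × String)))))) :=
  [("events", [[("segs", [[("utf8", " Hello ")], [("utf8", "world\n")]])], [("other", [])]])]

def Spec_parse_youtube_json3 (data : List (String × List (List (String × List (List (String × String)))))) (out : String) : Prop := out = parse_youtube_json3_alt data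
instance (data : List (String × List (List (String × List (List (String × String)))))) (out : String) : Decidable (Spec_parse_youtube_json3 data out) := by unfold Spec_parse_youtube_json3; infer_instance

-- ===== CLAIM (what is proved, stated in full; the proofs are below) =====
def Claim_equal_parse_youtube_json3 : Prop := ∀ (data : List (String × List (List (String × List (List (String × String)))))), Dom_parse_youtube_json3 data → Pre_parse_youtube_json3 data → Spec_parse_youtube_json3 data (parse_youtube_json3 data)

-- ===== LEMMAS AND PROOFS =====

-- B's state machine as a structural recursion (proof helper; the port keeps the foldl)
def pvM : List Char → Bool → Bool → List Char
  | [], _, _ => []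
  | c :: s, started, pending =>
    if PySem.Chars.isspace c then pvM s started started
    else (if pending then [' ', c] else [c]) ++ pvM s true false

-- the foldl of the port computes pvM (output component)
theorem pv_fold_eq_pvM (s : List Char) (out : List Char) (started pending : Bool) :
    (s.foldl (fun (st : List Char × Bool × Bool) ch =>
        if PySem.Chars.isspace ch then (st.1, st.2.1, st.2.1)
        else ((if st.2.2 then st.1 ++ [' '] else st.1) ++ [ch], true, false))
      (out, started, pending)).1 = out ++ pvM s started pending := by
  induction s generalizing out started pending with
  | nil => simp [pvM]
  | cons c s ih =>
    simp only [List.foldl_cons, pvM]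
    split_ifs with h hp
    · rw [ih]
    · rw [ih]; simp
    · rw [ih]; simp

-- split₀.go prepends the reversed accumulator
theorem pv_go_acc (s cur : List Char) (acc : List (List Char)) :
    PySem.Chars.split₀.go s cur acc = acc.reverse ++ PySem.Chars.split₀.go s cur [] := by
  induction s generalizing cur acc with
  | nil => simp only [PySem.Chars.split₀.go]; split_ifs <;> simp
  | cons c rest ih =>
    simp only [PySem.Chars.split₀.go]
    split_ifs with h1 h2
    · exact ih [] acc
    · rw [ih [] (cur.reverse :: acc), ih [] [cur.reverse]]; simp
    · exact ih (c :: cur) acc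

-- a pending word guarantees at least one word in the result
theorem pv_go_ne (s : List Char) (cur : List Char) (hcur : cur ≠ []) :
    PySem.Chars.split₀.go s cur [] ≠ [] := by
  induction s generalizing cur with
  | nil =>
    simp only [PySem.Chars.split₀.go]
    rw [if_neg (by simpa using hcur)]
    simp
  | cons c rest ih =>
    simp only [PySem.Chars.split₀.go]
    split_ifs with h1 h2
    · exact absurd (by simpa using h2) hcur
    · rw [pv_go_acc]
      rcases h : PySem.Chars.split₀.go rest [] [] with _ | _ <;> simp
    · exact ih (c :: cur) (by simp)

-- join over a cons of words
theorem pv_join_cons (w : List Char) (ws : List (List Char)) :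
    PySem.Chars.join [' '] (w :: ws)
      = w ++ (if ws = [] then [] else ' ' :: PySem.Chars.join [' '] ws) := by
  cases ws with
  | nil => simp [PySem.Chars.join, List.intercalate]
  | cons q r => simp [PySem.Chars.join, List.intercalate, List.intersperse]

-- the machine, started mid-word / in a gap / fresh, against split₀.go
theorem pv_machine_go (s : List Char) :
    (∀ cur : List Char, cur ≠ [] →
        PySem.Chars.join [' '] (PySem.Chars.split₀.go s cur [])
          = cur.reverse ++ pvM s true false) ∧
    (pvM s true true
        = if PySem.Chars.split₀.go s [] [] = [] then []
          else ' ' :: PySem.Chars.join [' '] (PySem.Chars.split₀.go s [] [])) ∧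
    (PySem.Chars.join [' '] (PySem.Chars.split₀.go s [] []) = pvM s false false) := by
  induction s with
  | nil =>
    refine ⟨fun cur hcur => ?_, by simp [pvM, PySem.Chars.split₀.go], ?_⟩
    · simp only [PySem.Chars.split₀.go]
      rw [if_neg (by simpa using hcur)]
      simp [pvM, PySem.Chars.join, List.intercalate]
    · simp [pvM, PySem.Chars.split₀.go, PySem.Chars.join, List.intercalate]
  | cons c s ih =>
    obtain ⟨ihW, ihG, ihS⟩ := ih
    by_cases hc : PySem.Chars.isspace c = true
    · have hgo : PySem.Chars.split₀.go (c :: s) [] [] = PySem.Chars.split₀.go s [] [] := by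
        simp [PySem.Chars.split₀.go, hc]
      refine ⟨fun cur hcur => ?_, ?_, ?_⟩
      · have hgo2 : PySem.Chars.split₀.go (c :: s) cur [] = PySem.Chars.split₀.go s [] [cur.reverse] := by
          simp only [PySem.Chars.split₀.go, if_pos hc]
          rw [if_neg (by simpa using hcur)]
        rw [hgo2, pv_go_acc, show pvM (c :: s) true false = pvM s true true from by
          simp [pvM, hc]]
        simp only [List.reverse_cons, List.reverse_nil, List.nil_append,
          List.singleton_append, pv_join_cons, ihG]
      · rw [show pvM (c :: s) true true = pvM s true true from by simp [pvM, hc], hgo]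
        exact ihG
      · rw [show pvM (c :: s) false false = pvM s false false from by simp [pvM, hc], hgo]
        exact ihS
    · have hgo : PySem.Chars.split₀.go (c :: s) [] [] = PySem.Chars.split₀.go s [c] [] := by
        simp [PySem.Chars.split₀.go, hc]
      refine ⟨fun cur hcur => ?_, ?_, ?_⟩
      · have hgo2 : PySem.Chars.split₀.go (c :: s) cur [] = PySem.Chars.split₀.go s (c :: cur) [] := by
          simp [PySem.Chars.split₀.go, hc]
        rw [hgo2, ihW (c :: cur) (by simp), show pvM (c :: s) true false = [c] ++ pvM s true false from by
          simp [pvM, hc]]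
        simp
      · rw [show pvM (c :: s) true true = [' ', c] ++ pvM s true false from by simp [pvM, hc], hgo]
        rw [if_neg (pv_go_ne s [c] (by simp)), ihW [c] (by simp)]
        simp
      · rw [show pvM (c :: s) false false = [c] ++ pvM s true false from by simp [pvM, hc], hgo]
        rw [ihW [c] (by simp)]
        simp

-- corollary used by the verdict: fresh machine run = normalized join of the words
theorem pv_machine_eq (s : List Char) :
    pvM s false false = PySem.Chars.join [' '] (PySem.Chars.split₀ s) :=
  (pv_machine_go s).2.2.symm

-- a space splits the word stream
theorem pv_go_space (a b cur : List Char) :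
    PySem.Chars.split₀.go (a ++ ' ' :: b) cur [] =
      PySem.Chars.split₀.go a cur [] ++ PySem.Chars.split₀.go b [] [] := by
  induction a generalizing cur with
  | nil =>
    simp only [List.nil_append, PySem.Chars.split₀.go]
    have hsp : PySem.Chars.isspace ' ' = true := by decide
    rw [if_pos hsp]
    split_ifs with h
    · simp
    · rw [pv_go_acc b [] [cur.reverse]]
  | cons c a' ih =>
    simp only [List.cons_append, PySem.Chars.split₀.go]
    split_ifs with h1 h2
    · exact ih []
    · rw [pv_go_acc (a' ++ ' ' :: b) [] [cur.reverse], pv_go_acc a' [] [cur.reverse], ih []]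
      simp
    · exact ih (c :: cur)

theorem pv_split_append_space (a b : List Char) :
    PySem.Chars.split₀ (a ++ ' ' :: b) = PySem.Chars.split₀ a ++ PySem.Chars.split₀ b :=
  pv_go_space a b []

-- splitting a space-join = flatMap of the splits
theorem pv_split_join (parts : List (List Char)) :
    PySem.Chars.split₀ (PySem.Chars.join [' '] parts) = parts.flatMap PySem.Chars.split₀ := by
  induction parts with
  | nil => rfl
  | cons p rest ih =>
    cases rest with
    | nil => simp [PySem.Chars.join, List.intercalate]
    | cons q r =>
      have : PySem.Chars.join [' '] (p :: q :: r) = p ++ ' ' :: PySem.Chars.join [' '] (q :: r) := by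
        simp [PySem.Chars.join, List.intercalate, List.intersperse]
      rw [this, pv_split_append_space, ih]
      simp

-- all-whitespace input yields no words beyond the pending one
theorem pv_go_allspace (w cur : List Char) (acc : List (List Char))
    (hw : ∀ c ∈ w, PySem.Chars.isspace c = true) :
    PySem.Chars.split₀.go w cur acc = PySem.Chars.split₀.go [] cur acc := by
  induction w generalizing cur acc with
  | nil => rfl
  | cons c rest ih =>
    have hc : PySem.Chars.isspace c = true := hw c (by simp)
    have hrest : ∀ c ∈ rest, PySem.Chars.isspace c = true := fun c hcm => hw c (by simp [hcm])
    simp only [PySem.Chars.split₀.go, if_pos hc]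
    split_ifs with h
    · rw [ih [] acc hrest]
      simp [PySem.Chars.split₀.go]
    · rw [ih [] (cur.reverse :: acc) hrest]
      simp [PySem.Chars.split₀.go]

-- trailing whitespace is irrelevant
theorem pv_go_append_ws (t w cur : List Char) (acc : List (List Char))
    (hw : ∀ c ∈ w, PySem.Chars.isspace c = true) :
    PySem.Chars.split₀.go (t ++ w) cur acc = PySem.Chars.split₀.go t cur acc := by
  induction t generalizing cur acc with
  | nil => simpa using pv_go_allspace w cur acc hw
  | cons c t' ih =>
    simp only [List.cons_append, PySem.Chars.split₀.go]
    split_ifs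
    · exact ih [] acc
    · exact ih [] (cur.reverse :: acc)
    · exact ih (c :: cur) acc

theorem pv_split_rstrip (s : List Char) :
    PySem.Chars.split₀ (PySem.Chars.rstrip s) = PySem.Chars.split₀ s := by
  have hdecomp : s = PySem.Chars.rstrip s ++ (s.reverse.takeWhile PySem.Chars.isspace).reverse := by
    unfold PySem.Chars.rstrip
    conv_lhs => rw [← List.reverse_reverse s,
      ← List.takeWhile_append_dropWhile (p := PySem.Chars.isspace) (l := s.reverse)]
    rw [List.reverse_append]
  conv_rhs => rw [hdecomp]
  unfold PySem.Chars.split₀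
  rw [pv_go_append_ws]
  intro c hc
  rw [List.mem_reverse] at hc
  exact List.mem_takeWhile_imp hc

theorem pv_go_lstrip (s : List Char) (acc : List (List Char)) :
    PySem.Chars.split₀.go (PySem.Chars.lstrip s) [] acc = PySem.Chars.split₀.go s [] acc := by
  induction s with
  | nil => rfl
  | cons c rest ih =>
    unfold PySem.Chars.lstrip at ih ⊢
    by_cases hc : PySem.Chars.isspace c = true
    · rw [List.dropWhile_cons_of_pos hc, ih]
      simp only [PySem.Chars.split₀.go, if_pos hc]
      rw [if_pos (by simp)]
    · rw [List.dropWhile_cons_of_neg (by simp [hc])]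

theorem pv_split_strip (s : List Char) :
    PySem.Chars.split₀ (PySem.Chars.strip s) = PySem.Chars.split₀ s := by
  unfold PySem.Chars.strip
  rw [pv_split_rstrip]
  exact pv_go_lstrip s []

-- String-level corollaries
theorem pv_str_split_strip (s : String) :
    PySem.Str.split₀ (PySem.Str.strip s) = PySem.Str.split₀ s := by
  simp [PySem.Str.split₀, PySem.Str.strip, pv_split_strip]

theorem pv_str_split_join (parts : List String) :
    PySem.Str.split₀ (PySem.Str.join " " parts) = parts.flatMap PySem.Str.split₀ := by
  simp only [PySem.Str.split₀, PySem.Str.join]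
  have h1 : (" " : String).toList = [' '] := rfl
  simp only [String.toList_ofList, h1, pv_split_join]
  rw [List.flatMap_map, List.map_flatMap]
  rfl

-- A's nested collect-loop (with filter) as a flatMap
theorem pv_foldl_nested {α β γ : Type} (C : β → Bool) (S : β → List γ) (p : γ → Bool) (f : γ → α)
    (events : List β) (init : List α) :
    events.foldl (fun parts event =>
        if C event then
          (S event).foldl (fun parts seg => if p seg then parts ++ [f seg] else parts) parts
        else parts) init
      = init ++ events.flatMap (fun event => if C event then ((S event).filter p).map f else []) := by
  induction events generalizing init with
  | nil => simp
  | cons e rest ih =>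
    simp only [List.foldl_cons, List.flatMap_cons]
    by_cases hC : C e = true
    · rw [if_pos hC, if_pos hC, PySem.List.foldl_append_if, ih]
      simp
    · rw [if_neg hC, if_neg hC, ih]
      simp

-- B's unconditional nested collect-loop as a flatMap
theorem pv_foldl_collect {α β γ : Type} (C : β → Bool) (S : β → List γ) (f : γ → α)
    (events : List β) (init : List α) :
    events.foldl (fun parts event =>
        if C event then (S event).foldl (fun parts seg => parts ++ [f seg]) parts
        else parts) init
      = init ++ events.flatMap (fun event => if C event then (S event).map f else []) := by
  induction events generalizing init with
  | nil => simp
  | cons e rest ih =>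
    simp only [List.foldl_cons, List.flatMap_cons]
    by_cases hC : C e = true
    · rw [if_pos hC, if_pos hC, PySem.List.foldl_append_singleton_eq_map, ih]
      simp
    · rw [if_neg hC, if_neg hC, ih]
      simp

-- what one segment contributes, as words
theorem pv_seg_words (s : String) :
    (if (PySem.Str.strip s != "" && PySem.Str.strip s != "\n") = true
      then [PySem.Str.strip s] else []).flatMap PySem.Str.split₀ = PySem.Str.split₀ s := by
  rw [← pv_str_split_strip s]
  split_ifs with h
  · simp
  · simp only [Bool.and_eq_true, bne_iff_ne, ne_eq, not_and, not_not] at h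
    by_cases hs : PySem.Str.strip s = ""
    · rw [hs]; decide
    · rw [h hs]; decide

theorem pv_filter_map_flatMap {γ : Type} (p : γ → Bool) (f : γ → String) (l : List γ) :
    (((l.filter p).map f).flatMap PySem.Str.split₀)
      = l.flatMap (fun x => (if p x = true then [f x] else []).flatMap PySem.Str.split₀) := by
  induction l with
  | nil => rfl
  | cons x rest ih =>
    by_cases hx : p x = true
    · simp [hx, ih]
    · simp [hx, ih]

-- ===== VERDICT (by name: the statement is the Claim_ definition above) =====
theorem parse_youtube_json3_spec : Claim_equal_parse_youtube_json3 := by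
  intro data _ _
  simp only [Spec_parse_youtube_json3, parse_youtube_json3, parse_youtube_json3_alt]
  -- B side: foldl machine = pvM = normalized join of split₀ of the blob
  rw [pv_fold_eq_pvM, List.nil_append, pv_machine_eq]
  -- both sides are String-level joins of word lists; move to Str level on B
  have hB : ∀ blob : String,
      String.ofList (PySem.Chars.join [' '] (PySem.Chars.split₀ blob.toList))
        = PySem.Str.join " " (PySem.Str.split₀ blob) := by
    intro blob
    simp only [PySem.Str.join, PySem.Str.split₀, List.map_map]
    have hid : List.map (String.toList ∘ String.ofList) (PySem.Chars.split₀ blob.toList)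
        = PySem.Chars.split₀ blob.toList := by
      simp [Function.comp_def]
    rw [hid]
    rfl
  rw [hB, pv_str_split_join, pv_foldl_collect, List.nil_append]
  rw [pv_foldl_nested
      (C := fun event => (PySem.Dict.mk event).contains "segs")
      (S := fun event => (PySem.Dict.mk event).getD "segs" [])
      (p := fun seg => (PySem.Str.strip ((PySem.Dict.mk seg).getD "utf8" "") != "" &&
                        PySem.Str.strip ((PySem.Dict.mk seg).getD "utf8" "") != "\n"))
      (f := fun seg => PySem.Str.strip ((PySem.Dict.mk seg).getD "utf8" ""))]
  simp only [List.nil_append, pv_str_split_join]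
  rw [List.flatMap_assoc, List.flatMap_assoc]
  congr 1
  apply List.flatMap_congr
  intro event _
  by_cases hC : (PySem.Dict.mk event).contains "segs" = true
  · rw [if_pos hC, if_pos hC, pv_filter_map_flatMap]
    rw [List.flatMap_map]
    apply List.flatMap_congr
    intro seg _
    exact pv_seg_words _
  · rw [if_neg hC, if_neg hC]
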